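-- pv_equiv track=rewrite | github.com/Huntler/OpenRC-Simulator | OpenRCSimulator/graphics/objects/text_field.py | float_filter
-- ===== SOURCE A (Python) =====
-- def float_filter(text: str) -> str:
--     """This function applies a filter on a given text to convert a string
--     to a float number.
--
--     Args:
--         text (str): The text to be filtered.
--
--     Returns:
--         str: The filtered text.
--     """
--     result = ""
--     no_dot = True
--     for c in text:
--         if str.isdigit(c):
--             result += c
--         if c == "." and no_dot:
--             result += c
--             no_dot = False
--     return result
-- ===== SOURCE B (Python) =====
-- def float_filter(text: str) -> str:
--     head, sep, tail = text.partition(".")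
--     return (
--         "".join(c for c in head if c.isdigit())
--         + sep
--         + "".join(c for c in tail if c.isdigit())
--     )
-- ===== Notes on version B (the rewrite author's own statement) =====
-- stated objective: simpler
-- what changed: Replaces the per-character no_dot flag loop with str.partition at the first dot and independent digit filters on the two halves (the empty separator handles the no-dot case).
import Mathlib
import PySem

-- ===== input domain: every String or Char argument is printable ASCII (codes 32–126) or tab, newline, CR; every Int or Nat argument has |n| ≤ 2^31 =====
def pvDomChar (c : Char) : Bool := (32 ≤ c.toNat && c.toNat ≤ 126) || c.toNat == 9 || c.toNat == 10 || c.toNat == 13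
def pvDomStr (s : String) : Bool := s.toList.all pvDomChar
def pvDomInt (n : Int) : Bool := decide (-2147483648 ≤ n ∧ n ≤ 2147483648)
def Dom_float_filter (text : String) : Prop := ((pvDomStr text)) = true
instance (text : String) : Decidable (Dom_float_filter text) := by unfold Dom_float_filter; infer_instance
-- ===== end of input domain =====

-- ===== PORT A =====
-- one pass keeping a no_dot flag; B instead partitions at the first dot and filters the halves (simpler decomposition)
def pvStepA (st : List Char × Bool) (c : Char) : List Char × Bool :=
  let r := if PySem.Chars.isdigit c then st.1 ++ [c] else st.1
  if c = '.' ∧ st.2 = true then (r ++ ['.'], false) else (r, st.2)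

def float_filter (text : String) : String :=
  String.mk (text.toList.foldl pvStepA ([], true)).1

-- ===== PORT B =====
-- str.partition "." : (before first dot, separator, after); separator is [] when no dot
def pvPart3 : List Char → List Char × List Char × List Char
  | [] => ([], [], [])
  | c :: cs =>
    if c = '.' then ([], ['.'], cs)
    else
      let p := pvPart3 cs
      (c :: p.1, p.2.1, p.2.2)

def float_filter_alt (text : String) : String :=
  let p := pvPart3 text.toList
  String.mk (p.1.filter PySem.Chars.isdigit ++ p.2.1 ++ p.2.2.filter PySem.Chars.isdigit)

-- ===== PRECONDITION & SPEC =====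
def Spec_float_filter (text : String) (out : String) : Prop := out = float_filter_alt text
instance (text : String) (out : String) : Decidable (Spec_float_filter text out) := by unfold Spec_float_filter; infer_instance

-- ===== CLAIM (what is proved, stated in full; the proofs are below) =====
def Claim_equal_float_filter : Prop := ∀ (text : String), Dom_float_filter text → Spec_float_filter text (float_filter text)

-- ===== LEMMAS AND PROOFS =====


lemma pvFoldA_false (l : List Char) (r : List Char) :
    l.foldl pvStepA (r, false) = (r ++ l.filter PySem.Chars.isdigit, false) := by
  induction l generalizing r with
  | nil => simp
  | cons c cs ih =>
    simp only [List.foldl_cons, pvStepA, List.filter_cons]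
    by_cases hd : PySem.Chars.isdigit c <;> simp [hd, ih]

lemma pvFoldA_true (l : List Char) (r : List Char) :
    (l.foldl pvStepA (r, true)).1 =
      r ++ (pvPart3 l).1.filter PySem.Chars.isdigit ++ (pvPart3 l).2.1
        ++ (pvPart3 l).2.2.filter PySem.Chars.isdigit := by
  induction l generalizing r with
  | nil => simp [pvPart3]
  | cons c cs ih =>
    by_cases hc : c = '.'
    · subst hc
      simp only [List.foldl_cons, pvStepA, pvPart3]
      have hnd : PySem.Chars.isdigit '.' = false := by decide
      simp [hnd, pvFoldA_false]
    · simp only [List.foldl_cons, pvStepA, pvPart3, if_neg hc]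
      by_cases hd : PySem.Chars.isdigit c <;>
        simp [hd, hc, ih]

-- ===== VERDICT (by name: the statement is the Claim_ definition above) =====
theorem float_filter_spec : Claim_equal_float_filter := by
  intro text _
  unfold Spec_float_filter float_filter float_filter_alt
  have h := pvFoldA_true text.toList []
  simp only [List.nil_append] at h
  simp [h]
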